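-- pv_equiv track=rewrite | github.com/yofn/pyacm | codeforces/dp动态规划/1200/1343C正负变换子序列和.py | msms
-- ===== SOURCE A (Python) =====
-- def msms(a):
--     rmax = a[0]
--     ss   = rmax
--     for i in range(1,len(a)):
--         if a[i]*rmax<0:
--             ss  += a[i]
--             rmax = a[i]
--             continue
--         if a[i]>rmax:
--             ss  += a[i]-rmax
--             rmax = a[i]
--     return ss
-- ===== SOURCE B (Python) =====
-- def msms(a):
--     # Pass 1: split a into maximal runs that never change sign relative to the
--     # running maximum of the current run (same boundary test as the problem: x*rmax < 0).
--     groups = []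
--     cur = [a[0]]
--     rmax = a[0]
--     for x in a[1:]:
--         if x * rmax < 0:
--             groups.append(cur)
--             cur = [x]
--             rmax = x
--         else:
--             cur.append(x)
--             if x > rmax:
--                 rmax = x
--     groups.append(cur)
--     # Pass 2: pick the best element of each run.
--     return sum(max(g) for g in groups)
-- ===== Notes on version B (the rewrite author's own statement) =====
-- stated objective: alternative
-- what changed: Replaces A's single fused running-max/accumulator loop with a two-pass decomposition: first materialize the sign-runs as explicit groups, then sum the maximum of each group.
import Mathlib
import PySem

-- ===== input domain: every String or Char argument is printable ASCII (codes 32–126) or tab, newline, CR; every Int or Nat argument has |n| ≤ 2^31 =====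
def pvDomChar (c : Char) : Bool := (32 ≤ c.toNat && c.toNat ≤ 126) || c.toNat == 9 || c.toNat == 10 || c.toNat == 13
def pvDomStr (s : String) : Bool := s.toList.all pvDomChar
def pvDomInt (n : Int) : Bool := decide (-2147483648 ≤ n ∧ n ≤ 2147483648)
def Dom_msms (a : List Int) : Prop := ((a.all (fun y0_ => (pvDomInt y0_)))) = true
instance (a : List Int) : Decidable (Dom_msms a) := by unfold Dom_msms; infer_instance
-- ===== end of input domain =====

-- B re-derives the same sum by a two-pass decomposition: build the sign-runs as explicit
-- groups, then sum the maximum of each group (alternative decomposition, same O(n) cost).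

-- ===== PORT A =====
def msms (a : List Int) : Int :=
  let rmax0 := PySem.List.pyGetD a 0 0
  let st := (PySem.List.pyRange 1 (PySem.List.len a) 1).foldl
    (fun (p : Int × Int) i =>
      let ai := PySem.List.pyGetD a i 0
      if ai * p.2 < 0 then (p.1 + ai, ai)
      else if ai > p.2 then (p.1 + (ai - p.2), ai)
      else p)
    (rmax0, rmax0)
  st.1

-- ===== PORT B =====
def msms_alt (a : List Int) : Int :=
  let h0 := PySem.List.pyGetD a 0 0
  let st := (PySem.List.slice a (some 1) none).foldl
    (fun (p : List (List Int) × List Int × Int) x =>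
      if x * p.2.2 < 0 then (p.1 ++ [p.2.1], [x], x)
      else (p.1, p.2.1 ++ [x], if x > p.2.2 then x else p.2.2))
    ([], [h0], h0)
  ((st.1 ++ [st.2.1]).map (fun g => (PySem.List.max? g (fun y => y)).getD 0)).sum

-- ===== PRECONDITION & SPEC =====
-- A indexes the first element and raises IndexError on the empty list; Pre_ excludes exactly that (B raises there too).
def Pre_msms (a : List Int) : Prop := a ≠ []
instance (a : List Int) : Decidable (Pre_msms a) := by unfold Pre_msms; infer_instance
def pvWitness_msms : List Int := [1, -2, 3, 3, -1]

def Spec_msms (a : List Int) (out : Int) : Prop := out = msms_alt a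
instance (a : List Int) (out : Int) : Decidable (Spec_msms a out) := by unfold Spec_msms; infer_instance

-- ===== CLAIM (what is proved, stated in full; the proofs are below) =====
def Claim_equal_msms : Prop := ∀ (a : List Int), Dom_msms a → Pre_msms a → Spec_msms a (msms a)

-- ===== LEMMAS AND PROOFS =====

/-- Joint loop invariant: A's running pair (ss, rmax) against B's (groups, cur, rmax).
`cur = c :: t` is always nonempty, `r` is its maximum, and `ss` is the sum of the
maxima of the closed groups plus `r`. -/
theorem key (l : List Int) (acc : List (List Int)) (c : Int) (t : List Int) (r ss : Int)
    (hr : t.foldl max c = r)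
    (hs : ss = (acc.map (fun g => (PySem.List.max? g (fun y => y)).getD 0)).sum + r) :
    (l.foldl
      (fun (p : Int × Int) ai =>
        if ai * p.2 < 0 then (p.1 + ai, ai)
        else if ai > p.2 then (p.1 + (ai - p.2), ai)
        else p) (ss, r)).1
    =
    (let st := l.foldl
      (fun (p : List (List Int) × List Int × Int) x =>
        if x * p.2.2 < 0 then (p.1 ++ [p.2.1], [x], x)
        else (p.1, p.2.1 ++ [x], if x > p.2.2 then x else p.2.2))
      (acc, c :: t, r);
     ((st.1 ++ [st.2.1]).map (fun g => (PySem.List.max? g (fun y => y)).getD 0)).sum) := by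
  induction l generalizing acc c t r ss with
  | nil =>
    simp [PySem.List.max?_id_cons, hr, hs]
  | cons x l ih =>
    simp only [List.foldl_cons]
    by_cases hneg : x * r < 0
    · rw [if_pos hneg, if_pos hneg,
        ih (acc ++ [c :: t]) x [] x (ss + x) rfl
          (by simp [PySem.List.max?_id_cons, hr, hs])]
    · by_cases hgt : x > r
      · rw [if_neg hneg, if_neg hneg, if_pos hgt, if_pos hgt,
          ih acc c (t ++ [x]) x (ss + (x - r))
            (by simp only [List.foldl_append, List.foldl_cons, List.foldl_nil, hr]; omega)
            (by omega)]
        rfl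
      · rw [if_neg hneg, if_neg hneg, if_neg hgt, if_neg hgt,
          ih acc c (t ++ [x]) r ss
            (by simp only [List.foldl_append, List.foldl_cons, List.foldl_nil, hr]; omega)
            hs]
        rfl

-- ===== VERDICT (by name: the statement is the Claim_ definition above) =====
theorem msms_spec : Claim_equal_msms := by
  intro a _ hpre
  unfold Spec_msms msms msms_alt
  cases a with
  | nil => exact absurd rfl hpre
  | cons h tl =>
    rw [PySem.List.slice_from_one]
    have h0 : PySem.List.pyGetD (h :: tl) (0 : Int) 0 = h := by
      simp [PySem.List.pyGetD_zero]
    simp only [h0, List.tail_cons]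
    rw [show (PySem.List.pyRange 1 (PySem.List.len (h :: tl)) 1).foldl
          (fun (p : Int × Int) i =>
            let ai := PySem.List.pyGetD (h :: tl) i 0
            if ai * p.2 < 0 then (p.1 + ai, ai)
            else if ai > p.2 then (p.1 + (ai - p.2), ai)
            else p) (h, h)
        = (List.drop (1 : Int).toNat (h :: tl)).foldl
          (fun (p : Int × Int) ai =>
            if ai * p.2 < 0 then (p.1 + ai, ai)
            else if ai > p.2 then (p.1 + (ai - p.2), ai)
            else p) (h, h)
      from PySem.List.foldl_pyRange_pyGetD (h :: tl) 0
        (fun (p : Int × Int) ai =>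
          if ai * p.2 < 0 then (p.1 + ai, ai)
          else if ai > p.2 then (p.1 + (ai - p.2), ai)
          else p) (h, h) (a := 1) (by norm_num)]
    exact key tl [] h [] h h rfl (by simp)
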